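-- pv_equiv track=rewrite | github.com/Josue23/lista-de-exercicios-python-brasil | secao_02_estrutura_de_decisao/ex_25_sherlock.py | investigar
-- ===== SOURCE A (Python) =====
-- def investigar(telefonou: str, estava_no_local: str, mora_perto: str, devia: str, trabalhou: str, ):
--     """Escreva aqui em baixo a sua solução"""
--     respostas_dict = {}
--     respostas_dict['telefonou'] = telefonou
--     respostas_dict['estava_no_local'] = estava_no_local
--     respostas_dict['mora_perto'] = mora_perto
--     respostas_dict['devia'] = devia
--     respostas_dict['trabalhou'] = trabalhou
--
--     respostas_positivas = 0
--     for key, value in respostas_dict.items():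
--         if value == 'Sim':
--             respostas_positivas += 1
--
--     mensagem_dict = {
--         respostas_positivas < 2: 'Inocente',
--         respostas_positivas == 2: 'Suspeito',
--         respostas_positivas > 2: 'Cúmplice',
--         respostas_positivas == 5: 'Assassino',
--     }
--
--     return mensagem_dict.get(True)
-- ===== SOURCE B (Python) =====
-- def investigar(telefonou: str, estava_no_local: str, mora_perto: str, devia: str, trabalhou: str, ):
--     # Severity ladder: every 'Sim' answer promotes the verdict by discarding the
--     # front of the ladder; the verdict is whatever remains at the front.
--     ladder = ['Inocente', 'Inocente', 'Suspeito', 'Cúmplice', 'Cúmplice', 'Assassino']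
--     for resposta in (telefonou, estava_no_local, mora_perto, devia, trabalhou):
--         if resposta == 'Sim':
--             ladder = ladder[1:]
--     return ladder[0]
-- ===== Notes on version B (the rewrite author's own statement) =====
-- stated objective: alternative
-- what changed: Replaces A's answer dict, counting loop and duplicate-boolean-key dict lookup with a severity-ladder list whose front is popped once per 'Sim' answer, the verdict being the element left at the front; no counter and no keyed lookup exist in B.
import Mathlib
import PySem

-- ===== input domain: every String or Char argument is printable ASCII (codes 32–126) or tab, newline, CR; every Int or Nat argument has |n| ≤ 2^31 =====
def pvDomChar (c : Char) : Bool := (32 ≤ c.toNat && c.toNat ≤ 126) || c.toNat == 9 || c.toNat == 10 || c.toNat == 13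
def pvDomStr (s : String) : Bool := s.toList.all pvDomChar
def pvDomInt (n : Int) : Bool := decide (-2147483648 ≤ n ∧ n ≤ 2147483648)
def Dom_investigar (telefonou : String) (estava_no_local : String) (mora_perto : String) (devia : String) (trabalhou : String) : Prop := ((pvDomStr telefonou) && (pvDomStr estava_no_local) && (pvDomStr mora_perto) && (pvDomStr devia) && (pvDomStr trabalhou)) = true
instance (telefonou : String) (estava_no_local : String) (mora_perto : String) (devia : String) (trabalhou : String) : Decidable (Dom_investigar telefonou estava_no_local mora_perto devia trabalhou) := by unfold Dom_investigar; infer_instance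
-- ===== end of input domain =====

-- B replaces A's answer dict, counting loop and duplicate-boolean-key dict lookup with a
-- severity-ladder list popped once per 'Sim' answer (objective: alternative, same cost).

-- ===== PORT A =====
def investigar (telefonou : String) (estava_no_local : String) (mora_perto : String) (devia : String) (trabalhou : String) : String :=
  let respostas_dict : PySem.Dict String String :=
    (((((PySem.Dict.empty.insert "telefonou" telefonou).insert "estava_no_local" estava_no_local).insert
        "mora_perto" mora_perto).insert "devia" devia).insert "trabalhou" trabalhou)
  let respostas_positivas : Int :=
    respostas_dict.items.foldl (fun acc kv => if kv.2 == "Sim" then acc + 1 else acc) 0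
  let mensagem_dict : PySem.Dict Bool String :=
    ((((PySem.Dict.empty.insert (decide (respostas_positivas < 2)) "Inocente").insert
        (respostas_positivas == 2) "Suspeito").insert
        (decide (respostas_positivas > 2)) "Cúmplice").insert
        (respostas_positivas == 5) "Assassino")
  -- .get(True): the key true is always present (count <2, =2 or >2), so the default is unreachable
  (mensagem_dict.get? true).getD ""

-- ===== PORT B =====
def investigar_alt (telefonou : String) (estava_no_local : String) (mora_perto : String) (devia : String) (trabalhou : String) : String :=
  let ladder : List String :=
    [telefonou, estava_no_local, mora_perto, devia, trabalhou].foldl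
      (fun ladder resposta => if resposta == "Sim" then PySem.List.slice ladder (some 1) none else ladder)
      ["Inocente", "Inocente", "Suspeito", "Cúmplice", "Cúmplice", "Assassino"]
  -- ladder[0]: at most 5 pops of a 6-element list, so the front exists and the default is unreachable
  (PySem.List.pyGet? ladder 0).getD ""

-- ===== PRECONDITION & SPEC =====
def Spec_investigar (telefonou : String) (estava_no_local : String) (mora_perto : String) (devia : String) (trabalhou : String) (out : String) : Prop := out = investigar_alt telefonou estava_no_local mora_perto devia trabalhou
instance (telefonou : String) (estava_no_local : String) (mora_perto : String) (devia : String) (trabalhou : String) (out : String) : Decidable (Spec_investigar telefonou estava_no_local mora_perto devia trabalhou out) := by unfold Spec_investigar; infer_instance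

-- ===== CLAIM (what is proved, stated in full; the proofs are below) =====
def Claim_equal_investigar : Prop := ∀ (telefonou : String) (estava_no_local : String) (mora_perto : String) (devia : String) (trabalhou : String), Dom_investigar telefonou estava_no_local mora_perto devia trabalhou → Spec_investigar telefonou estava_no_local mora_perto devia trabalhou (investigar telefonou estava_no_local mora_perto devia trabalhou)

-- ===== LEMMAS AND PROOFS =====

-- ===== VERDICT (by name: the statement is the Claim_ definition above) =====
theorem investigar_spec : Claim_equal_investigar := by
  intro t e m d w _
  unfold Spec_investigar investigar investigar_alt
  by_cases h1 : t = "Sim" <;> by_cases h2 : e = "Sim" <;> by_cases h3 : m = "Sim" <;>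
    by_cases h4 : d = "Sim" <;> by_cases h5 : w = "Sim" <;>
    simp [h1, h2, h3, h4, h5, PySem.Dict.insert, PySem.Dict.empty, PySem.Dict.get?,
      PySem.List.pyGet?, PySem.List.pyIdx?, PySem.List.slice]
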